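-- pv_equiv track=rewrite | github.com/nanxun00/PhaseRiskNet | phase_core.py | _apply_ps_spacing
-- ===== SOURCE A (Python) =====
-- def _apply_ps_spacing(peaks: list[int], other_peaks: list[int], min_gap: int) -> list[int]:
--     if min_gap <= 0 or not other_peaks:
--         return peaks
--     filtered = []
--     for idx in peaks:
--         if all((abs(idx - prev) >= min_gap for prev in other_peaks)):
--             filtered.append(idx)
--     return filtered
-- ===== SOURCE B (Python) =====
-- def _apply_ps_spacing(peaks: list[int], other_peaks: list[int], min_gap: int) -> list[int]:
--     if min_gap <= 0 or not other_peaks: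
--         return peaks
--     s = sorted(other_peaks)
--
--     def count_le(x):
--         # number of elements of s that are <= x (binary search on the sorted list)
--         lo, hi = 0, len(s)
--         while lo < hi:
--             mid = (lo + hi) // 2
--             if s[mid] <= x:
--                 lo = mid + 1
--             else:
--                 hi = mid
--         return lo
--
--     # keep idx iff no other peak lies in the open window (idx-min_gap, idx+min_gap)
--     return [idx for idx in peaks
--             if count_le(idx + min_gap - 1) == count_le(idx - min_gap)]
-- ===== Notes on version B (the rewrite author's own statement) =====
-- stated objective: faster
-- what changed: Instead of scanning all other_peaks for every peak, B sorts other_peaks once and decides each peak by two binary searches (count of elements <= idx+min_gap-1 vs <= idx-min_gap), so a peak is kept iff the counts are equal.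
import Mathlib
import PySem

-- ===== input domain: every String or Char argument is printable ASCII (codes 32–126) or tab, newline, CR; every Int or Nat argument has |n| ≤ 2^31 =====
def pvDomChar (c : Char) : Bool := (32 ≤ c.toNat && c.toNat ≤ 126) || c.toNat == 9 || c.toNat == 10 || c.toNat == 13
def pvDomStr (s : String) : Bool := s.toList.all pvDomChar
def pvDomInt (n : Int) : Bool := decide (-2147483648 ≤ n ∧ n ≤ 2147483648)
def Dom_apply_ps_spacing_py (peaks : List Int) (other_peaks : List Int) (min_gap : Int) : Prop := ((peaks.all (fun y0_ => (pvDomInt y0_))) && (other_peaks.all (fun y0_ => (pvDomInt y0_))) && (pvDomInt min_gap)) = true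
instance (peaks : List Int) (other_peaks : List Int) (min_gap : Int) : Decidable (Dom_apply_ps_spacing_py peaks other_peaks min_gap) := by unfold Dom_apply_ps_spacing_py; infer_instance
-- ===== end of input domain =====

-- B sorts other_peaks once and replaces A's per-peak scan of all other peaks by two binary
-- searches; objective: faster (O((n+m) log m) instead of O(n*m)).

-- ===== PORT A =====
def apply_ps_spacing_py (peaks : List Int) (other_peaks : List Int) (min_gap : Int) : List Int :=
  if min_gap ≤ 0 ∨ other_peaks = [] then peaks
  else
    peaks.foldl (fun filtered idx =>
      if other_peaks.all (fun prev => decide (min_gap ≤ |idx - prev|)) then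
        filtered ++ [idx]
      else filtered) []

-- ===== PORT B =====
-- the hand-written `count_le` binary search of Source B (index always in range, so getD is exact);
-- `fuel` only guards totality: the window shrinks each pass, so fuel = s.length never runs out
def pvCountLE (s : List Int) (x : Int) : Nat → Nat → Nat → Nat
  | 0, lo, _ => lo
  | fuel + 1, lo, hi =>
    if lo < hi then
      if s.getD ((lo + hi) / 2) 0 ≤ x then pvCountLE s x fuel ((lo + hi) / 2 + 1) hi
      else pvCountLE s x fuel lo ((lo + hi) / 2)
    else lo

def apply_ps_spacing_py_alt (peaks : List Int) (other_peaks : List Int) (min_gap : Int) : List Int :=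
  if min_gap ≤ 0 ∨ other_peaks = [] then peaks
  else
    let s := PySem.List.sorted other_peaks (fun x => x) false
    peaks.filter (fun idx =>
      pvCountLE s (idx + min_gap - 1) s.length 0 s.length ==
        pvCountLE s (idx - min_gap) s.length 0 s.length)

-- ===== PRECONDITION & SPEC =====
def Spec_apply_ps_spacing_py (peaks : List Int) (other_peaks : List Int) (min_gap : Int) (out : List Int) : Prop := out = apply_ps_spacing_py_alt peaks other_peaks min_gap
instance (peaks : List Int) (other_peaks : List Int) (min_gap : Int) (out : List Int) : Decidable (Spec_apply_ps_spacing_py peaks other_peaks min_gap out) := by unfold Spec_apply_ps_spacing_py; infer_instance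

-- ===== CLAIM (what is proved, stated in full; the proofs are below) =====
def Claim_equal_apply_ps_spacing_py : Prop := ∀ (peaks : List Int) (other_peaks : List Int) (min_gap : Int), Dom_apply_ps_spacing_py peaks other_peaks min_gap → Spec_apply_ps_spacing_py peaks other_peaks min_gap (apply_ps_spacing_py peaks other_peaks min_gap)

-- ===== LEMMAS AND PROOFS =====

-- on a sorted list, getD is monotone in the index
lemma pvSortedGetDMono (s : List Int) (hs : s.Pairwise (· ≤ ·)) {i j : Nat}
    (hij : i ≤ j) (hj : j < s.length) : s.getD i 0 ≤ s.getD j 0 := by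
  rcases Nat.eq_or_lt_of_le hij with rfl | h
  · exact le_refl _
  · rw [List.getD_eq_getElem s 0 (Nat.lt_trans h hj), List.getD_eq_getElem s 0 hj]
    exact List.pairwise_iff_getElem.mp hs i j (Nat.lt_trans h hj) hj h

-- binary-search invariant: on a sorted list, the returned index splits s into (≤ x) / (> x)
lemma pvCountLE_split (s : List Int) (x : Int) (hs : s.Pairwise (· ≤ ·)) :
    ∀ n lo hi, hi - lo ≤ n → lo ≤ hi → hi ≤ s.length →
      (∀ i, i < lo → s.getD i 0 ≤ x) →
      (∀ i, hi ≤ i → i < s.length → x < s.getD i 0) →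
      (∀ i, i < pvCountLE s x n lo hi → s.getD i 0 ≤ x) ∧
      (∀ i, pvCountLE s x n lo hi ≤ i → i < s.length → x < s.getD i 0) ∧
      pvCountLE s x n lo hi ≤ s.length := by
  intro n
  induction n with
  | zero =>
    intro lo hi hfuel hlh hhl hlow hup
    simp only [pvCountLE]
    exact ⟨hlow, fun i hi' hil => hup i (by omega) hil, by omega⟩
  | succ n ih =>
    intro lo hi hfuel hlh hhl hlow hup
    by_cases h : lo < hi
    · simp only [pvCountLE, if_pos h]
      by_cases hmid : s.getD ((lo + hi) / 2) 0 ≤ x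
      · rw [if_pos hmid]
        refine ih ((lo + hi) / 2 + 1) hi (by omega) (by omega) hhl ?_ hup
        intro i hi'
        by_cases hilo : i < lo
        · exact hlow i hilo
        · exact le_trans (pvSortedGetDMono s hs (by omega) (by omega)) hmid
      · rw [if_neg hmid]
        refine ih lo ((lo + hi) / 2) (by omega) (by omega) (by omega) hlow ?_
        intro i hi' hil
        exact lt_of_lt_of_le (lt_of_not_ge hmid) (pvSortedGetDMono s hs hi' hil)
    · simp only [pvCountLE, if_neg h]
      exact ⟨hlow, fun i hi' hil => hup i (by omega) hil, by omega⟩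

-- counts-equal ⟺ no element of s in the half-open window (x2, x1]
lemma pvCountLE_eq_iff (s : List Int) (x1 x2 : Int) (hs : s.Pairwise (· ≤ ·)) (hx : x2 ≤ x1) :
    (pvCountLE s x1 s.length 0 s.length = pvCountLE s x2 s.length 0 s.length) ↔
      ∀ y ∈ s, ¬(x2 < y ∧ y ≤ x1) := by
  obtain ⟨P1, Q1, B1⟩ := pvCountLE_split s x1 hs s.length 0 s.length (by omega) (by omega)
    (le_refl _) (fun i hi => absurd hi (Nat.not_lt_zero i)) (fun i hi hil => absurd hil (by omega))
  obtain ⟨P2, Q2, B2⟩ := pvCountLE_split s x2 hs s.length 0 s.length (by omega) (by omega)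
    (le_refl _) (fun i hi => absurd hi (Nat.not_lt_zero i)) (fun i hi hil => absurd hil (by omega))
  constructor
  · intro heq y hy hwin
    obtain ⟨i, hil, rfl⟩ := List.mem_iff_getElem.mp hy
    rw [← List.getD_eq_getElem s 0 hil] at hwin
    by_cases hik : i < pvCountLE s x1 s.length 0 s.length
    · exact absurd (P2 i (heq ▸ hik)) (by omega)
    · exact absurd (Q1 i (by omega) hil) (by omega)
  · intro hno
    by_contra hne
    have h21 : pvCountLE s x2 s.length 0 s.length ≤ pvCountLE s x1 s.length 0 s.length := by
      by_contra hlt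
      have hil : pvCountLE s x1 s.length 0 s.length < s.length := by omega
      have h1 := Q1 (pvCountLE s x1 s.length 0 s.length) (le_refl _) hil
      have h2 := P2 (pvCountLE s x1 s.length 0 s.length) (by omega)
      omega
    have hlt : pvCountLE s x2 s.length 0 s.length < pvCountLE s x1 s.length 0 s.length := by omega
    have hil : pvCountLE s x2 s.length 0 s.length < s.length := by omega
    have h1 := P1 (pvCountLE s x2 s.length 0 s.length) hlt
    have h2 := Q2 (pvCountLE s x2 s.length 0 s.length) (le_refl _) hil
    have hmem : s.getD (pvCountLE s x2 s.length 0 s.length) 0 ∈ s := by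
      rw [List.getD_eq_getElem s 0 hil]; exact List.getElem_mem hil
    exact hno _ hmem ⟨h2, h1⟩

-- the per-peak tests of A and B agree
lemma pvTestEq (other_peaks : List Int) (min_gap idx : Int) (hpos : 0 < min_gap) :
    other_peaks.all (fun prev => decide (min_gap ≤ |idx - prev|)) =
      (pvCountLE (PySem.List.sorted other_peaks (fun x => x) false) (idx + min_gap - 1)
          (PySem.List.sorted other_peaks (fun x => x) false).length 0
          (PySem.List.sorted other_peaks (fun x => x) false).length ==
        pvCountLE (PySem.List.sorted other_peaks (fun x => x) false) (idx - min_gap)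
          (PySem.List.sorted other_peaks (fun x => x) false).length 0
          (PySem.List.sorted other_peaks (fun x => x) false).length) := by
  have hs : (PySem.List.sorted other_peaks (fun x => x) false).Pairwise (· ≤ ·) :=
    PySem.List.sorted_pairwise other_peaks (fun x => x)
  rw [Bool.eq_iff_iff, List.all_eq_true, beq_iff_eq,
    pvCountLE_eq_iff _ _ _ hs (by omega)]
  constructor
  · intro h y hy hwin
    have := h y ((PySem.List.mem_sorted _ _ _ _).mp hy)
    rw [decide_eq_true_eq, le_abs] at this
    omega
  · intro h prev hprev
    rw [decide_eq_true_eq, le_abs]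
    have := h prev ((PySem.List.mem_sorted _ _ _ _).mpr hprev)
    by_contra hc
    push Not at hc
    exact this ⟨by omega, by omega⟩

-- ===== VERDICT (by name: the statement is the Claim_ definition above) =====
theorem apply_ps_spacing_py_spec : Claim_equal_apply_ps_spacing_py := by
  intro peaks other_peaks min_gap _
  unfold Spec_apply_ps_spacing_py apply_ps_spacing_py apply_ps_spacing_py_alt
  by_cases hc : min_gap ≤ 0 ∨ other_peaks = []
  · rw [if_pos hc, if_pos hc]
  · rw [if_neg hc, if_neg hc]
    rw [PySem.List.foldl_append_if_eq_filter]
    rw [List.nil_append]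
    refine List.filter_congr ?_
    intro idx _
    exact pvTestEq other_peaks min_gap idx (by omega)
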